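-- pv_equiv track=rewrite | github.com/s3rvac/advent-of-code | 2024/12/aoc12_part2.py | split_garden_into_regions
-- ===== SOURCE A (Python) =====
-- NEIGHBOR_DIRECTIONS = [(0, 1), (0, -1), (-1, 0), (1, 0)]
--
-- def is_plot_inside_garden(i, j, garden):
--     return 0 <= i < len(garden) and 0 <= j < len(garden[i])
--
-- def get_region_for_plot(i, j, garden):
--     # Use depth-first search to get all the regions for the given plot.
--     # Breadth-first search would work as well.
--     region = {(i, j)}
--     to_visit = [(i, j)]
--     while to_visit:
--         i, j = to_visit.pop()
--         for ix, jx in NEIGHBOR_DIRECTIONS: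
--             new_i, new_j = i + ix, j + jx
--             if (
--                 is_plot_inside_garden(new_i, new_j, garden)
--                 and garden[i][j] == garden[new_i][new_j]
--                 and (new_i, new_j) not in region
--             ):
--                 region.add((new_i, new_j))
--                 to_visit.append((new_i, new_j))
--     return region
--
-- def split_garden_into_regions(garden):
--     regions = []
--     checked_plots = set()
--     for i in range(len(garden)):
--         for j in range(len(garden[i])):
--             if (i, j) not in checked_plots:
--                 region = get_region_for_plot(i, j, garden)
--                 regions.append(region)
--                 checked_plots |= region
--     return regions
-- ===== SOURCE B (Python) =====
-- def split_garden_into_regions(garden):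
--     regions = []
--     checked = set()
--     for i, row in enumerate(garden):
--         for j in range(len(row)):
--             if (i, j) in checked:
--                 continue
--             # Grow the whole frontier level by level (set-at-a-time fixpoint),
--             # instead of walking cell by cell with an explicit stack.
--             region = set()
--             frontier = {(i, j)}
--             while frontier:
--                 region |= frontier
--                 frontier = {
--                     (ni, nj)
--                     for (ci, cj) in frontier
--                     for (ni, nj) in ((ci, cj + 1), (ci, cj - 1), (ci - 1, cj), (ci + 1, cj))
--                     if 0 <= ni < len(garden) and 0 <= nj < len(garden[ni])
--                     and garden[ni][nj] == row[j]
--                     and (ni, nj) not in region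
--                 }
--             regions.append(region)
--             checked |= region
--     return regions
-- ===== Notes on version B (the rewrite author's own statement) =====
-- stated objective: alternative
-- what changed: Replaces A's per-plot DFS with an explicit stack (pop one cell, test its four neighbours against the current cell's value) by whole-frontier level-at-a-time expansion: each iteration of a set-fixpoint loop absorbs the frontier into the region and builds the next frontier with a set comprehension testing candidates against the region's start value; the outer scan uses enumerate/continue instead of nested index ranges.
import Mathlib
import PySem

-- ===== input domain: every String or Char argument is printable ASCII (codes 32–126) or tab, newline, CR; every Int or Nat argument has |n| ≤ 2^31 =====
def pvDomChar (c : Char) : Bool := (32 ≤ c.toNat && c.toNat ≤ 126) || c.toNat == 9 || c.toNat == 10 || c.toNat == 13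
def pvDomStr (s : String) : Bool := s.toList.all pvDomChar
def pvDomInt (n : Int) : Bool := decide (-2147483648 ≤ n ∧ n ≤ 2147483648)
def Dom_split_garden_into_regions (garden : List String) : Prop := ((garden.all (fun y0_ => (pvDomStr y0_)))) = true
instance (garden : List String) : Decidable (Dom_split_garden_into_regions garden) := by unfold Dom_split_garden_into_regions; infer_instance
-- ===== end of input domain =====

-- B replaces A's per-cell DFS stack by whole-frontier (level-at-a-time) set expansion; objective: alternative.
-- Both Pythons return a list of SETS; since a Python set's iteration order is not semantic, both ports
-- enumerate each returned region set canonically (row-major over the garden's cells).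

-- ===== PORT A =====
-- row-major list of all in-bounds plots; used only for the canonical enumeration of a returned set
-- (and as the fuel bound making the while loops total)
def pvCells (garden : List String) : List (Int × Int) :=
  (PySem.List.pyRange 0 (PySem.List.len garden) 1).flatMap (fun i =>
    (PySem.List.pyRange 0 (PySem.Str.len (PySem.List.pyGetD garden i "")) 1).map (fun j => (i, j)))

def NEIGHBOR_DIRECTIONS : List (Int × Int) := [(0, 1), (0, -1), (-1, 0), (1, 0)]

def is_plot_inside_garden (i j : Int) (garden : List String) : Bool :=
  decide (0 ≤ i) && decide (i < PySem.List.len garden) &&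
    (decide (0 ≤ j) && decide (j < PySem.Str.len (PySem.List.pyGetD garden i "")))

-- garden[i][j] (some value iff both indices are in range; A only evaluates it on in-range indices)
def pvVal (garden : List String) (i j : Int) : Option Char :=
  (PySem.List.pyGet? garden i).bind (fun row => PySem.Str.pyGet? row j)

-- body of A's 'for ix, jx in NEIGHBOR_DIRECTIONS' loop, state = (region, to_visit)
def pvDfsStep (garden : List String) (c : Int × Int)
    (st : PySem.Set (Int × Int) × List (Int × Int)) : PySem.Set (Int × Int) × List (Int × Int) :=
  NEIGHBOR_DIRECTIONS.foldl (fun st d =>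
    let nc := (c.1 + d.1, c.2 + d.2)
    if is_plot_inside_garden nc.1 nc.2 garden
        && (pvVal garden c.1 c.2 == pvVal garden nc.1 nc.2)
        && !(PySem.Set.contains st.1 nc) then
      (PySem.Set.add st.1 nc, st.2 ++ [nc])
    else st) st

-- A's 'while to_visit' loop; fuel makes it total (2*#cells+2 always suffices, proved below)
def pvDfsGo (garden : List String) :
    Nat → PySem.Set (Int × Int) → List (Int × Int) → PySem.Set (Int × Int)
  | 0, region, _ => region
  | fuel + 1, region, to_visit =>
    match PySem.List.pop? to_visit with
    | none => region
    | some (c, rest) =>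
      let st := pvDfsStep garden c (region, rest)
      pvDfsGo garden fuel st.1 st.2

def get_region_for_plot (i j : Int) (garden : List String) : PySem.Set (Int × Int) :=
  pvDfsGo garden (2 * (pvCells garden).length + 2) (PySem.Set.ofList [(i, j)]) [(i, j)]

def split_garden_into_regions (garden : List String) : List (List (Int × Int)) :=
  ((PySem.List.pyRange 0 (PySem.List.len garden) 1).foldl (fun st i =>
    (PySem.List.pyRange 0 (PySem.Str.len (PySem.List.pyGetD garden i "")) 1).foldl (fun st j =>
      if !(PySem.Set.contains st.2 (i, j)) then
        let region := get_region_for_plot i j garden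
        -- append the region SET, enumerated canonically (its Python iteration order is not semantic)
        (st.1 ++ [(pvCells garden).filter (fun c => PySem.Set.contains region c)],
         PySem.Set.union st.2 region)
      else st) st)
    (([] : List (List (Int × Int))), (PySem.Set.empty : PySem.Set (Int × Int)))).1

-- ===== PORT B =====
-- the set comprehension building the next frontier (v0 = row[j], the region's plant value)
def pvGrowFrontier (garden : List String) (v0 : Option Char)
    (region : PySem.Set (Int × Int)) (frontier : PySem.Set (Int × Int)) : PySem.Set (Int × Int) :=
  frontier.foldl (fun acc c =>
    [(c.1, c.2 + 1), (c.1, c.2 - 1), (c.1 - 1, c.2), (c.1 + 1, c.2)].foldl (fun acc nc =>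
      if (decide (0 ≤ nc.1) && decide (nc.1 < PySem.List.len garden)
            && decide (0 ≤ nc.2) && decide (nc.2 < PySem.Str.len (PySem.List.pyGetD garden nc.1 "")))
          && (pvVal garden nc.1 nc.2 == v0)
          && !(PySem.Set.contains region nc) then PySem.Set.add acc nc else acc) acc)
    PySem.Set.empty

-- B's 'while frontier' loop; fuel makes it total (#cells+2 always suffices, proved below)
def pvExpand (garden : List String) (v0 : Option Char) :
    Nat → PySem.Set (Int × Int) → PySem.Set (Int × Int) → PySem.Set (Int × Int)
  | 0, region, _ => region
  | fuel + 1, region, frontier =>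
    if frontier.isEmpty then region
    else
      let region2 := PySem.Set.union region frontier
      pvExpand garden v0 fuel region2 (pvGrowFrontier garden v0 region2 frontier)

def split_garden_into_regions_alt (garden : List String) : List (List (Int × Int)) :=
  ((PySem.List.enumerate garden).foldl (fun st p =>
    (PySem.List.pyRange 0 (PySem.Str.len p.2) 1).foldl (fun st j =>
      if PySem.Set.contains st.2 (p.1, j) then st
      else
        let region := pvExpand garden (PySem.Str.pyGet? p.2 j) ((pvCells garden).length + 2)
          PySem.Set.empty (PySem.Set.ofList [(p.1, j)])
        -- append the region SET, enumerated canonically (its Python iteration order is not semantic)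
        (st.1 ++ [(pvCells garden).filter (fun c => PySem.Set.contains region c)],
         PySem.Set.union st.2 region)) st)
    (([] : List (List (Int × Int))), (PySem.Set.empty : PySem.Set (Int × Int)))).1

-- ===== PRECONDITION & SPEC =====
def Spec_split_garden_into_regions (garden : List String) (out : List (List (Int × Int))) : Prop := out = split_garden_into_regions_alt garden
instance (garden : List String) (out : List (List (Int × Int))) : Decidable (Spec_split_garden_into_regions garden out) := by unfold Spec_split_garden_into_regions; infer_instance

-- ===== CLAIM (what is proved, stated in full; the proofs are below) =====
def Claim_equal_split_garden_into_regions : Prop := ∀ (garden : List String), Dom_split_garden_into_regions garden → Spec_split_garden_into_regions garden (split_garden_into_regions garden)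

-- ===== LEMMAS AND PROOFS =====

-- same-value 4-adjacency between in-bounds plots
def pvEdge (g : List String) (c d : Int × Int) : Prop :=
  is_plot_inside_garden c.1 c.2 g = true ∧ is_plot_inside_garden d.1 d.2 g = true ∧
    (d.1 - c.1, d.2 - c.2) ∈ NEIGHBOR_DIRECTIONS ∧ pvVal g c.1 c.2 = pvVal g d.1 d.2

def pvReach (g : List String) (s d : Int × Int) : Prop := Relation.ReflTransGen (pvEdge g) s d

-- membership in pvCells = being in bounds
lemma mem_pvCells (g : List String) (x : Int × Int) :
    x ∈ pvCells g ↔ is_plot_inside_garden x.1 x.2 g = true := by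
  obtain ⟨i, j⟩ := x
  simp [pvCells, is_plot_inside_garden, List.mem_flatMap, PySem.List.mem_pyRange_one]

lemma reach_inside (g : List String) (s : Int × Int)
    (hs : is_plot_inside_garden s.1 s.2 g = true) (x : Int × Int) (h : pvReach g s x) :
    is_plot_inside_garden x.1 x.2 g = true := by
  induction h with
  | refl => exact hs
  | tail _ h2 _ => exact h2.2.1

lemma reach_val (g : List String) (s x : Int × Int) (h : pvReach g s x) :
    pvVal g s.1 s.2 = pvVal g x.1 x.2 := by
  induction h with
  | refl => rfl
  | tail _ h2 ih => exact ih.trans h2.2.2.2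

lemma reach_subset_of_closed (g : List String) (s : Int × Int) (r : List (Int × Int))
    (hc : ∀ x ∈ r, ∀ d, pvEdge g x d → d ∈ r) (hs : s ∈ r) (x : Int × Int)
    (h : pvReach g s x) : x ∈ r := by
  induction h with
  | refl => exact hs
  | tail _ h2 ih => exact hc _ ih _ h2

-- length bound for a nodup sublist of pvCells
lemma length_le_cells (g : List String) (r : List (Int × Int)) (hn : r.Nodup)
    (hsub : ∀ x ∈ r, is_plot_inside_garden x.1 x.2 g = true) :
    r.length ≤ (pvCells g).length := by
  exact ((hn.subperm (fun x hx => (mem_pvCells g x).mpr (hsub x hx)))).length_le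

lemma nodup_length_lt (r r2 : List (Int × Int)) (hn : r.Nodup) (hn2 : r2.Nodup)
    (hsub : ∀ x ∈ r, x ∈ r2) (x : Int × Int) (hx : x ∈ r2) (hxr : x ∉ r) :
    r.length < r2.length := by
  rw [← List.toFinset_card_of_nodup hn, ← List.toFinset_card_of_nodup hn2]
  apply Finset.card_lt_card
  constructor
  · intro y hy; simp only [List.mem_toFinset] at *; exact hsub y hy
  · intro hback
    exact hxr (List.mem_toFinset.mp (hback (List.mem_toFinset.mpr hx)))

-- ---------- A side ----------

-- the body of A's neighbour loop, named for the proofs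
def pvDfsBody (g : List String) (c : Int × Int) :
    PySem.Set (Int × Int) × List (Int × Int) → Int × Int → PySem.Set (Int × Int) × List (Int × Int) :=
  fun st d =>
    let nc := (c.1 + d.1, c.2 + d.2)
    if is_plot_inside_garden nc.1 nc.2 g
        && (pvVal g c.1 c.2 == pvVal g nc.1 nc.2)
        && !(PySem.Set.contains st.1 nc) then
      (PySem.Set.add st.1 nc, st.2 ++ [nc])
    else st

lemma pvDfsStep_eq (g : List String) (c : Int × Int)
    (st : PySem.Set (Int × Int) × List (Int × Int)) :
    pvDfsStep g c st = NEIGHBOR_DIRECTIONS.foldl (pvDfsBody g c) st := rfl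

lemma pvDfsFold (g : List String) (c : Int × Int) (L : List (Int × Int)) :
    ∀ (region : PySem.Set (Int × Int)) (tv : List (Int × Int)),
    (∀ x ∈ (L.foldl (pvDfsBody g c) (region, tv)).1,
        x ∈ region ∨ (is_plot_inside_garden x.1 x.2 g = true ∧
          pvVal g c.1 c.2 = pvVal g x.1 x.2 ∧ (x.1 - c.1, x.2 - c.2) ∈ L)) ∧
    (∀ x ∈ region, x ∈ (L.foldl (pvDfsBody g c) (region, tv)).1) ∧
    (∀ x ∈ (L.foldl (pvDfsBody g c) (region, tv)).2,
        x ∈ tv ∨ x ∈ (L.foldl (pvDfsBody g c) (region, tv)).1) ∧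
    (∀ x ∈ tv, x ∈ (L.foldl (pvDfsBody g c) (region, tv)).2) ∧
    (∀ d : Int × Int, (d.1 - c.1, d.2 - c.2) ∈ L → is_plot_inside_garden d.1 d.2 g = true →
      pvVal g c.1 c.2 = pvVal g d.1 d.2 → d ∈ (L.foldl (pvDfsBody g c) (region, tv)).1) ∧
    ((L.foldl (pvDfsBody g c) (region, tv)).1.length + tv.length =
      region.length + (L.foldl (pvDfsBody g c) (region, tv)).2.length) ∧
    (region.Nodup → (L.foldl (pvDfsBody g c) (region, tv)).1.Nodup) ∧
    (∀ x ∈ (L.foldl (pvDfsBody g c) (region, tv)).1,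
        x ∈ region ∨ x ∈ (L.foldl (pvDfsBody g c) (region, tv)).2) ∧
    (tv.length ≤ (L.foldl (pvDfsBody g c) (region, tv)).2.length) := by
  induction L with
  | nil =>
    intro region tv
    simp only [List.foldl_nil]
    exact ⟨fun x hx => Or.inl hx, fun x hx => hx, fun x hx => Or.inl hx, fun x hx => hx,
      fun d hd => by simp at hd, by trivial, fun h => h, fun x hx => Or.inl hx, le_refl _⟩
  | cons d0 L ih =>
    intro region tv
    simp only [List.foldl_cons]
    by_cases hc : (is_plot_inside_garden (c.1 + d0.1) (c.2 + d0.2) g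
        && (pvVal g c.1 c.2 == pvVal g (c.1 + d0.1) (c.2 + d0.2))
        && !(PySem.Set.contains region (c.1 + d0.1, c.2 + d0.2))) = true
    · have h := hc
      simp only [Bool.and_eq_true, Bool.not_eq_true', beq_iff_eq] at h
      obtain ⟨⟨hin, hval⟩, hcont⟩ := h
      have hnmem : (c.1 + d0.1, c.2 + d0.2) ∉ region := by
        intro hm
        rw [(PySem.Set.contains_iff region _).mpr hm] at hcont
        exact Bool.true_eq_false.mp hcont
      have hadd : PySem.Set.add region (c.1 + d0.1, c.2 + d0.2) =
          region ++ [(c.1 + d0.1, c.2 + d0.2)] := by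
        simp [PySem.Set.add, hnmem]
      have hb : pvDfsBody g c (region, tv) d0 =
          (region ++ [(c.1 + d0.1, c.2 + d0.2)], tv ++ [(c.1 + d0.1, c.2 + d0.2)]) := by
        show (if (is_plot_inside_garden (c.1 + d0.1) (c.2 + d0.2) g
            && (pvVal g c.1 c.2 == pvVal g (c.1 + d0.1) (c.2 + d0.2))
            && !(PySem.Set.contains region (c.1 + d0.1, c.2 + d0.2))) = true then
          (PySem.Set.add region (c.1 + d0.1, c.2 + d0.2), tv ++ [(c.1 + d0.1, c.2 + d0.2)])
          else (region, tv)) = _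
        rw [if_pos hc, hadd]
      rw [hb]
      obtain ⟨i1, i2, i3, i4, i5, i6, i7, i8, i9⟩ :=
        ih (region ++ [(c.1 + d0.1, c.2 + d0.2)]) (tv ++ [(c.1 + d0.1, c.2 + d0.2)])
      have hoff : ((c.1 + d0.1) - c.1, (c.2 + d0.2) - c.2) = d0 := by simp
      refine ⟨?_, ?_, ?_, ?_, ?_, ?_, ?_, ?_, ?_⟩
      · intro x hx
        rcases i1 x hx with hx' | ⟨ha, hb2, hcm⟩
        · rcases List.mem_append.mp hx' with hx'' | hx''
          · exact Or.inl hx''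
          · have hxe : x = (c.1 + d0.1, c.2 + d0.2) := by simpa using hx''
            subst hxe
            exact Or.inr ⟨hin, hval, by rw [hoff]; exact List.mem_cons_self⟩
        · exact Or.inr ⟨ha, hb2, List.mem_cons_of_mem _ hcm⟩
      · intro x hx
        exact i2 x (List.mem_append_left _ hx)
      · intro x hx
        rcases i3 x hx with hx' | hx'
        · rcases List.mem_append.mp hx' with hx'' | hx''
          · exact Or.inl hx''
          · exact Or.inr (i2 _ (List.mem_append_right _ hx''))
        · exact Or.inr hx'
      · intro x hx
        exact i4 x (List.mem_append_left _ hx)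
      · intro d hd hdin hdval
        rcases List.mem_cons.mp hd with hd' | hd'
        · have hde : d = (c.1 + d0.1, c.2 + d0.2) := by
            obtain ⟨da, db⟩ := d
            simp [Prod.ext_iff] at hd' ⊢
            omega
          subst hde
          exact i2 _ (List.mem_append_right _ (by simp))
        · exact i5 d hd' hdin hdval
      · simp only [List.length_append, List.length_cons, List.length_nil] at i6 ⊢
        omega
      · intro hn
        apply i7
        simp [List.nodup_append, hn]
        intro a b hab h1 h2
        subst h1; subst h2
        exact hnmem hab
      · intro x hx
        rcases i8 x hx with hx' | hx'
        · rcases List.mem_append.mp hx' with hx'' | hx''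
          · exact Or.inl hx''
          · exact Or.inr (i4 _ (List.mem_append_right _ hx''))
        · exact Or.inr hx'
      · simp only [List.length_append, List.length_cons, List.length_nil] at i9
        omega
    · have hb : pvDfsBody g c (region, tv) d0 = (region, tv) := by
        show (if (is_plot_inside_garden (c.1 + d0.1) (c.2 + d0.2) g
            && (pvVal g c.1 c.2 == pvVal g (c.1 + d0.1) (c.2 + d0.2))
            && !(PySem.Set.contains region (c.1 + d0.1, c.2 + d0.2))) = true then
          (PySem.Set.add region (c.1 + d0.1, c.2 + d0.2), tv ++ [(c.1 + d0.1, c.2 + d0.2)])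
          else (region, tv)) = _
        rw [if_neg hc]
      rw [hb]
      obtain ⟨i1, i2, i3, i4, i5, i6, i7, i8, i9⟩ := ih region tv
      refine ⟨?_, ?_, ?_, ?_, ?_, i6, i7, i8, i9⟩
      · intro x hx
        rcases i1 x hx with hx' | ⟨ha, hb2, hcm⟩
        · exact Or.inl hx'
        · exact Or.inr ⟨ha, hb2, List.mem_cons_of_mem _ hcm⟩
      · exact i2
      · exact i3
      · exact i4
      · intro d hd hdin hdval
        rcases List.mem_cons.mp hd with hd' | hd'
        · have hde : d = (c.1 + d0.1, c.2 + d0.2) := by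
            obtain ⟨da, db⟩ := d
            simp [Prod.ext_iff] at hd' ⊢
            omega
          subst hde
          by_cases hcont : PySem.Set.contains region (c.1 + d0.1, c.2 + d0.2) = true
          · exact i2 _ ((PySem.Set.contains_iff region _).mp hcont)
          · exfalso
            simp only [Bool.not_eq_true] at hcont
            have hnm : (c.1 + d0.1, c.2 + d0.2) ∉ region := by
              intro hm
              rw [(PySem.Set.contains_iff region _).mpr hm] at hcont
              exact Bool.true_eq_false.mp hcont
            apply hc
            simp [hdin, hdval, hnm]
        · exact i5 d hd' hdin hdval

def pvInvA (g : List String) (s : Int × Int) (region : PySem.Set (Int × Int))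
    (tv : List (Int × Int)) : Prop :=
  (∀ x ∈ region, pvReach g s x) ∧ (∀ x ∈ tv, x ∈ region) ∧ s ∈ region ∧
  (∀ x ∈ region, is_plot_inside_garden x.1 x.2 g = true) ∧ region.Nodup ∧
  (∀ x ∈ region, x ∉ tv → ∀ d, pvEdge g x d → d ∈ region)



lemma pvDfsGo_mem (g : List String) (s : Int × Int)
    (hs : is_plot_inside_garden s.1 s.2 g = true) :
    ∀ (fuel : Nat) (region : PySem.Set (Int × Int)) (tv : List (Int × Int)),
    pvInvA g s region tv →
    2 * (pvCells g).length + tv.length < fuel + 2 * region.length →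
    ∀ x, x ∈ pvDfsGo g fuel region tv ↔ pvReach g s x := by
  intro fuel
  induction fuel with
  | zero =>
    intro region tv hinv hm
    exfalso
    have hle := length_le_cells g region hinv.2.2.2.2.1 hinv.2.2.2.1
    omega
  | succ fuel ih =>
    intro region tv hinv hm x
    rcases List.eq_nil_or_concat tv with rfl | ⟨ys, cpop, rfl⟩
    · have hgo : pvDfsGo g (fuel + 1) region [] = region := by
        show (match PySem.List.pop? ([] : List (Int × Int)) with
          | none => region
          | some (c, rest) =>
            pvDfsGo g fuel (pvDfsStep g c (region, rest)).1 (pvDfsStep g c (region, rest)).2) = region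
        rfl
      rw [hgo]
      obtain ⟨h1, h2, h3, h4, h5, h6⟩ := hinv
      constructor
      · exact h1 x
      · exact reach_subset_of_closed g s region (fun y hy d hd => h6 y hy (by simp) d hd) h3 x
    · rw [List.concat_eq_append] at hm hinv ⊢
      have hgo : pvDfsGo g (fuel + 1) region (ys ++ [cpop]) =
          pvDfsGo g fuel (pvDfsStep g cpop (region, ys)).1 (pvDfsStep g cpop (region, ys)).2 := by
        show (match PySem.List.pop? (ys ++ [cpop]) with
          | none => region
          | some (c, rest) =>
            pvDfsGo g fuel (pvDfsStep g c (region, rest)).1 (pvDfsStep g c (region, rest)).2) = _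
        rw [PySem.List.pop?_last]
      rw [hgo, pvDfsStep_eq]
      obtain ⟨h1, h2, h3, h4, h5, h6⟩ := hinv
      have hcin : cpop ∈ region := h2 _ (by simp)
      have hcreach := h1 _ hcin
      have hcins := h4 _ hcin
      obtain ⟨i1, i2, i3, i4, i5, i6, i7, i8, i9⟩ := pvDfsFold g cpop NEIGHBOR_DIRECTIONS region ys
      refine ih _ _ ⟨?_, ?_, ?_, ?_, ?_, ?_⟩ ?_ x
      · intro y hy
        rcases i1 y hy with hy' | ⟨hiny, hvaly, hoff⟩
        · exact h1 y hy'
        · exact Relation.ReflTransGen.tail hcreach ⟨hcins, hiny, hoff, hvaly⟩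
      · intro y hy
        rcases i3 y hy with hy' | hy'
        · exact i2 _ (h2 _ (by simp [hy']))
        · exact hy'
      · exact i2 _ h3
      · intro y hy
        rcases i1 y hy with hy' | ⟨hiny, _, _⟩
        · exact h4 y hy'
        · exact hiny
      · exact i7 h5
      · intro y hy hnin d hd
        by_cases hyc : y = cpop
        · subst hyc
          exact i5 d hd.2.2.1 hd.2.1 hd.2.2.2
        · rcases i8 y hy with hy' | hy'
          · have hyn : y ∉ ys := fun hin => hnin (i4 y hin)
            have hny : y ∉ ys ++ [cpop] := by simp [hyn, hyc]
            exact i2 _ (h6 y hy' hny d hd)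
          · exact absurd hy' hnin
      · simp only [List.length_append, List.length_cons, List.length_nil] at hm
        omega

lemma get_region_mem (g : List String) (i j : Int)
    (hs : is_plot_inside_garden i j g = true) (x : Int × Int) :
    x ∈ get_region_for_plot i j g ↔ pvReach g (i, j) x := by
  have hof : PySem.Set.ofList [(i, j)] = [(i, j)] := rfl
  refine pvDfsGo_mem g (i, j) hs _ _ _ ⟨?_, ?_, ?_, ?_, ?_, ?_⟩ ?_ x
  · intro y hy
    rw [hof] at hy
    simp at hy
    subst hy
    exact Relation.ReflTransGen.refl
  · intro y hy
    rw [hof]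
    simpa using hy
  · rw [hof]; simp
  · intro y hy
    rw [hof] at hy
    simp at hy
    subst hy
    exact hs
  · rw [hof]; simp
  · intro y hy hny d hd
    exfalso
    rw [hof] at hy
    simp at hy
    subst hy
    exact hny (by simp)
  · rw [hof]
    simp

-- ---------- B side ----------

lemma pvCand_mem (c x : Int × Int) :
    x ∈ [(c.1, c.2 + 1), (c.1, c.2 - 1), (c.1 - 1, c.2), (c.1 + 1, c.2)] ↔
    (x.1 - c.1, x.2 - c.2) ∈ NEIGHBOR_DIRECTIONS := by
  obtain ⟨a, b⟩ := x; obtain ⟨p, q⟩ := c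
  simp [NEIGHBOR_DIRECTIONS, Prod.ext_iff]
  omega

-- the body of B's comprehension over the four neighbour candidates, named for the proofs
def pvGrowInner (g : List String) (v0 : Option Char) (region2 : PySem.Set (Int × Int)) :
    PySem.Set (Int × Int) → Int × Int → PySem.Set (Int × Int) :=
  fun acc nc =>
    if (decide (0 ≤ nc.1) && decide (nc.1 < PySem.List.len g)
          && decide (0 ≤ nc.2) && decide (nc.2 < PySem.Str.len (PySem.List.pyGetD g nc.1 "")))
        && (pvVal g nc.1 nc.2 == v0)
        && !(PySem.Set.contains region2 nc) then PySem.Set.add acc nc else acc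

lemma pvGrow_eq (g : List String) (v0 : Option Char)
    (region2 frontier : PySem.Set (Int × Int)) :
    pvGrowFrontier g v0 region2 frontier =
      frontier.foldl (fun acc c =>
        ([(c.1, c.2 + 1), (c.1, c.2 - 1), (c.1 - 1, c.2), (c.1 + 1, c.2)]).foldl
          (pvGrowInner g v0 region2) acc) PySem.Set.empty := rfl

lemma contains_false (s : PySem.Set (Int × Int)) (x : Int × Int) (h : x ∉ s) :
    PySem.Set.contains s x = false := by
  cases hc : PySem.Set.contains s x
  · rfl
  · exact absurd ((PySem.Set.contains_iff s x).mp hc) h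

lemma pvGrowCond_iff (g : List String) (v0 : Option Char) (region2 : PySem.Set (Int × Int))
    (nc : Int × Int) :
    ((decide (0 ≤ nc.1) && decide (nc.1 < PySem.List.len g)
          && decide (0 ≤ nc.2) && decide (nc.2 < PySem.Str.len (PySem.List.pyGetD g nc.1 "")))
        && (pvVal g nc.1 nc.2 == v0)
        && !(PySem.Set.contains region2 nc)) = true ↔
      (is_plot_inside_garden nc.1 nc.2 g = true ∧ pvVal g nc.1 nc.2 = v0 ∧ nc ∉ region2) := by
  have hins : (decide (0 ≤ nc.1) && decide (nc.1 < PySem.List.len g)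
          && decide (0 ≤ nc.2) && decide (nc.2 < PySem.Str.len (PySem.List.pyGetD g nc.1 ""))) =
      is_plot_inside_garden nc.1 nc.2 g := by
    rw [is_plot_inside_garden, Bool.and_assoc]
  rw [hins]
  simp only [Bool.and_eq_true, Bool.not_eq_true']
  constructor
  · rintro ⟨⟨h1, h2⟩, h3⟩
    refine ⟨h1, by simpa using h2, ?_⟩
    intro hm
    rw [(PySem.Set.contains_iff region2 nc).mpr hm] at h3
    exact Bool.true_eq_false.mp h3
  · rintro ⟨h1, h2, h3⟩
    exact ⟨⟨h1, by simpa using h2⟩, contains_false region2 nc h3⟩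

lemma pvGrowInnerFold (g : List String) (v0 : Option Char) (region2 : PySem.Set (Int × Int))
    (C : List (Int × Int)) :
    ∀ (acc : PySem.Set (Int × Int)),
    (∀ x ∈ C.foldl (pvGrowInner g v0 region2) acc, x ∈ acc ∨
      (x ∈ C ∧ is_plot_inside_garden x.1 x.2 g = true ∧ pvVal g x.1 x.2 = v0 ∧ x ∉ region2)) ∧
    (∀ x ∈ acc, x ∈ C.foldl (pvGrowInner g v0 region2) acc) ∧
    (∀ d ∈ C, is_plot_inside_garden d.1 d.2 g = true → pvVal g d.1 d.2 = v0 → d ∉ region2 →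
      d ∈ C.foldl (pvGrowInner g v0 region2) acc) ∧
    (acc.Nodup → (C.foldl (pvGrowInner g v0 region2) acc).Nodup) := by
  induction C with
  | nil =>
    intro acc
    exact ⟨fun x hx => Or.inl hx, fun x hx => hx, fun d hd => by simp at hd, fun h => h⟩
  | cons c0 C ih =>
    intro acc
    simp only [List.foldl_cons]
    by_cases hc : ((decide (0 ≤ c0.1) && decide (c0.1 < PySem.List.len g)
          && decide (0 ≤ c0.2) && decide (c0.2 < PySem.Str.len (PySem.List.pyGetD g c0.1 "")))
        && (pvVal g c0.1 c0.2 == v0)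
        && !(PySem.Set.contains region2 c0)) = true
    · obtain ⟨hin0, hval0, hreg0⟩ := (pvGrowCond_iff g v0 region2 c0).mp hc
      have hb : pvGrowInner g v0 region2 acc c0 = PySem.Set.add acc c0 := by
        show (if _ then PySem.Set.add acc c0 else acc) = PySem.Set.add acc c0
        rw [if_pos hc]
      rw [hb]
      obtain ⟨i1, i2, i3, i4⟩ := ih (PySem.Set.add acc c0)
      refine ⟨?_, ?_, ?_, ?_⟩
      · intro x hx
        rcases i1 x hx with hx' | ⟨hm, h⟩
        · rcases (PySem.Set.mem_add acc c0 x).mp hx' with hx'' | rfl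
          · exact Or.inl hx''
          · exact Or.inr ⟨List.mem_cons_self, hin0, hval0, hreg0⟩
        · exact Or.inr ⟨List.mem_cons_of_mem _ hm, h⟩
      · intro x hx
        exact i2 x ((PySem.Set.mem_add acc c0 x).mpr (Or.inl hx))
      · intro d hd hdin hdval hdreg
        rcases List.mem_cons.mp hd with rfl | hd'
        · exact i2 _ ((PySem.Set.mem_add acc d d).mpr (Or.inr rfl))
        · exact i3 d hd' hdin hdval hdreg
      · intro hn
        exact i4 (PySem.Set.nodup_add acc c0 hn)
    · have hb : pvGrowInner g v0 region2 acc c0 = acc := by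
        show (if _ then PySem.Set.add acc c0 else acc) = acc
        rw [if_neg hc]
      rw [hb]
      obtain ⟨i1, i2, i3, i4⟩ := ih acc
      refine ⟨?_, i2, ?_, i4⟩
      · intro x hx
        rcases i1 x hx with hx' | ⟨hm, h⟩
        · exact Or.inl hx'
        · exact Or.inr ⟨List.mem_cons_of_mem _ hm, h⟩
      · intro d hd hdin hdval hdreg
        rcases List.mem_cons.mp hd with rfl | hd'
        · exfalso
          exact hc ((pvGrowCond_iff g v0 region2 d).mpr ⟨hdin, hdval, hdreg⟩)
        · exact i3 d hd' hdin hdval hdreg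

lemma pvGrowFold (g : List String) (v0 : Option Char) (region2 : PySem.Set (Int × Int))
    (F : List (Int × Int)) :
    ∀ (acc : PySem.Set (Int × Int)),
    (∀ x ∈ F.foldl (fun acc c =>
        ([(c.1, c.2 + 1), (c.1, c.2 - 1), (c.1 - 1, c.2), (c.1 + 1, c.2)]).foldl
          (pvGrowInner g v0 region2) acc) acc, x ∈ acc ∨
      ((∃ c ∈ F, (x.1 - c.1, x.2 - c.2) ∈ NEIGHBOR_DIRECTIONS) ∧
        is_plot_inside_garden x.1 x.2 g = true ∧ pvVal g x.1 x.2 = v0 ∧ x ∉ region2)) ∧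
    (∀ x ∈ acc, x ∈ F.foldl (fun acc c =>
        ([(c.1, c.2 + 1), (c.1, c.2 - 1), (c.1 - 1, c.2), (c.1 + 1, c.2)]).foldl
          (pvGrowInner g v0 region2) acc) acc) ∧
    (∀ c ∈ F, ∀ d : Int × Int, (d.1 - c.1, d.2 - c.2) ∈ NEIGHBOR_DIRECTIONS →
      is_plot_inside_garden d.1 d.2 g = true → pvVal g d.1 d.2 = v0 → d ∉ region2 →
      d ∈ F.foldl (fun acc c =>
        ([(c.1, c.2 + 1), (c.1, c.2 - 1), (c.1 - 1, c.2), (c.1 + 1, c.2)]).foldl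
          (pvGrowInner g v0 region2) acc) acc) ∧
    (acc.Nodup → (F.foldl (fun acc c =>
        ([(c.1, c.2 + 1), (c.1, c.2 - 1), (c.1 - 1, c.2), (c.1 + 1, c.2)]).foldl
          (pvGrowInner g v0 region2) acc) acc).Nodup) := by
  induction F with
  | nil =>
    intro acc
    exact ⟨fun x hx => Or.inl hx, fun x hx => hx, fun c hc => by simp at hc, fun h => h⟩
  | cons c0 F ih =>
    intro acc
    simp only [List.foldl_cons]
    obtain ⟨j1, j2, j3, j4⟩ := pvGrowInnerFold g v0 region2
      [(c0.1, c0.2 + 1), (c0.1, c0.2 - 1), (c0.1 - 1, c0.2), (c0.1 + 1, c0.2)] acc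
    obtain ⟨i1, i2, i3, i4⟩ := ih ([(c0.1, c0.2 + 1), (c0.1, c0.2 - 1), (c0.1 - 1, c0.2),
      (c0.1 + 1, c0.2)].foldl (pvGrowInner g v0 region2) acc)
    refine ⟨?_, ?_, ?_, ?_⟩
    · intro x hx
      rcases i1 x hx with hx' | ⟨⟨c, hcF, hoff⟩, h⟩
      · rcases j1 x hx' with hx'' | ⟨hm, h⟩
        · exact Or.inl hx''
        · exact Or.inr ⟨⟨c0, List.mem_cons_self, (pvCand_mem c0 x).mp hm⟩, h⟩
      · exact Or.inr ⟨⟨c, List.mem_cons_of_mem _ hcF, hoff⟩, h⟩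
    · intro x hx
      exact i2 x (j2 x hx)
    · intro c hc d hoff hdin hdval hdreg
      rcases List.mem_cons.mp hc with rfl | hc'
      · exact i2 _ (j3 d ((pvCand_mem c d).mpr hoff) hdin hdval hdreg)
      · exact i3 c hc' d hoff hdin hdval hdreg
    · intro hn
      exact i4 (j4 hn)

lemma pvGrow_mem (g : List String) (v0 : Option Char) (region2 frontier : PySem.Set (Int × Int)) :
    (∀ x ∈ pvGrowFrontier g v0 region2 frontier,
      (∃ c ∈ frontier, (x.1 - c.1, x.2 - c.2) ∈ NEIGHBOR_DIRECTIONS) ∧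
        is_plot_inside_garden x.1 x.2 g = true ∧ pvVal g x.1 x.2 = v0 ∧ x ∉ region2) ∧
    (∀ c ∈ frontier, ∀ d : Int × Int, (d.1 - c.1, d.2 - c.2) ∈ NEIGHBOR_DIRECTIONS →
      is_plot_inside_garden d.1 d.2 g = true → pvVal g d.1 d.2 = v0 → d ∉ region2 →
      d ∈ pvGrowFrontier g v0 region2 frontier) := by
  rw [pvGrow_eq]
  obtain ⟨i1, i2, i3, i4⟩ := pvGrowFold g v0 region2 frontier PySem.Set.empty
  refine ⟨?_, ?_⟩
  · intro x hx
    rcases i1 x hx with hx' | h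
    · simp [PySem.Set.empty] at hx'
    · exact h
  · intro c hc d hoff hdin hdval hdreg
    exact i3 c hc d hoff hdin hdval hdreg

def pvInvB (g : List String) (s : Int × Int) (region frontier : PySem.Set (Int × Int)) : Prop :=
  (∀ x ∈ region, pvReach g s x) ∧ (∀ x ∈ frontier, pvReach g s x) ∧
  (∀ x ∈ region, ∀ d, pvEdge g x d → d ∈ region ∨ d ∈ frontier) ∧
  (s ∈ region ∨ s ∈ frontier) ∧ (∀ x ∈ frontier, x ∉ region) ∧ region.Nodup

lemma pvExpand_mem (g : List String) (s : Int × Int)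
    (hs : is_plot_inside_garden s.1 s.2 g = true) :
    ∀ (fuel : Nat) (region frontier : PySem.Set (Int × Int)),
    pvInvB g s region frontier →
    (pvCells g).length < fuel + region.length →
    ∀ x, x ∈ pvExpand g (pvVal g s.1 s.2) fuel region frontier ↔ pvReach g s x := by
  intro fuel
  induction fuel with
  | zero =>
    intro region frontier hinv hm
    exfalso
    obtain ⟨h1, h2, h3, h4, h5, h6⟩ := hinv
    have hsub : ∀ x ∈ region, is_plot_inside_garden x.1 x.2 g = true :=
      fun x hx => reach_inside g s hs x (h1 x hx)
    have := length_le_cells g region h6 hsub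
    omega
  | succ fuel ih =>
    intro region frontier hinv hm x
    obtain ⟨h1, h2, h3, h4, h5, h6⟩ := hinv
    match frontier with
    | [] =>
      have hgo : pvExpand g (pvVal g s.1 s.2) (fuel + 1) region [] = region := rfl
      rw [hgo]
      constructor
      · exact h1 x
      · refine reach_subset_of_closed g s region ?_ ?_ x
        · intro y hy d hd
          rcases h3 y hy d hd with h | h
          · exact h
          · simp at h
        · rcases h4 with h | h
          · exact h
          · simp at h
    | f0 :: fr =>
      have hgo : pvExpand g (pvVal g s.1 s.2) (fuel + 1) region (f0 :: fr) =
          pvExpand g (pvVal g s.1 s.2) fuel (PySem.Set.union region (f0 :: fr))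
            (pvGrowFrontier g (pvVal g s.1 s.2) (PySem.Set.union region (f0 :: fr))
              (f0 :: fr)) := rfl
      rw [hgo]
      obtain ⟨g1, g2⟩ := pvGrow_mem g (pvVal g s.1 s.2) (PySem.Set.union region (f0 :: fr))
        (f0 :: fr)
      have hreach2 : ∀ y ∈ PySem.Set.union region (f0 :: fr), pvReach g s y := by
        intro y hy
        rcases (PySem.Set.mem_union region (f0 :: fr) y).mp hy with h | h
        · exact h1 y h
        · exact h2 y h
      refine ih (PySem.Set.union region (f0 :: fr)) _
        ⟨hreach2, ?_, ?_, ?_, ?_, ?_⟩ ?_ x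
      · intro y hy
        obtain ⟨⟨c, hcF, hoff⟩, hiny, hvaly, _⟩ := g1 y hy
        have hcr : pvReach g s c := h2 c hcF
        have hcin : is_plot_inside_garden c.1 c.2 g = true := reach_inside g s hs c hcr
        have hcval : pvVal g s.1 s.2 = pvVal g c.1 c.2 := reach_val g s c hcr
        refine Relation.ReflTransGen.tail hcr ⟨hcin, hiny, hoff, ?_⟩
        rw [← hcval]
        exact hvaly.symm
      · intro y hy d hd
        rcases (PySem.Set.mem_union region (f0 :: fr) y).mp hy with h | h
        · rcases h3 y h d hd with h' | h'
          · exact Or.inl ((PySem.Set.mem_union _ _ d).mpr (Or.inl h'))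
          · exact Or.inl ((PySem.Set.mem_union _ _ d).mpr (Or.inr h'))
        · by_cases hdr : d ∈ PySem.Set.union region (f0 :: fr)
          · exact Or.inl hdr
          · refine Or.inr (g2 y h d hd.2.2.1 hd.2.1 ?_ hdr)
            have hyr : pvReach g s y := h2 y h
            rw [← hd.2.2.2]
            exact (reach_val g s y hyr).symm
      · refine Or.inl ((PySem.Set.mem_union _ _ s).mpr ?_)
        rcases h4 with h | h
        · exact Or.inl h
        · exact Or.inr h
      · intro y hy
        exact (g1 y hy).2.2.2
      · exact PySem.Set.nodup_union region (f0 :: fr) h6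
      · have hlt : region.length < (PySem.Set.union region (f0 :: fr)).length := by
          refine nodup_length_lt region _ h6 (PySem.Set.nodup_union region (f0 :: fr) h6)
            (fun y hy => (PySem.Set.mem_union _ _ y).mpr (Or.inl hy)) f0
            ((PySem.Set.mem_union _ _ f0).mpr (Or.inr (by simp))) (h5 f0 (by simp))
        omega

lemma pvExpand_top_mem (g : List String) (i j : Int)
    (hs : is_plot_inside_garden i j g = true) (x : Int × Int) :
    x ∈ pvExpand g (pvVal g i j) ((pvCells g).length + 2) PySem.Set.empty
        (PySem.Set.ofList [(i, j)]) ↔ pvReach g (i, j) x := by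
  have hof : PySem.Set.ofList [(i, j)] = [(i, j)] := rfl
  rw [hof]
  refine pvExpand_mem g (i, j) hs _ _ _ ⟨?_, ?_, ?_, ?_, ?_, ?_⟩ ?_ x
  · intro y hy
    simp [PySem.Set.empty] at hy
  · intro y hy
    simp at hy
    subst hy
    exact Relation.ReflTransGen.refl
  · intro y hy
    simp [PySem.Set.empty] at hy
  · exact Or.inr (by simp)
  · intro y hy
    simp [PySem.Set.empty]
  · exact List.nodup_nil
  · simp [PySem.Set.empty]

-- ---------- assembling the main loops ----------

lemma pyGetD_val (g : List String) (i j : Int) (h0 : 0 ≤ i) (h1 : i < PySem.List.len g) :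
    PySem.Str.pyGet? (PySem.List.pyGetD g i "") j = pvVal g i j := by
  rw [PySem.List.len_eq] at h1
  rw [pvVal, PySem.List.pyGetD_eq_getElem g "" h0 h1, PySem.List.pyGet?_eq_some_getElem g h0 h1]
  rfl

lemma foldl_rel {ι α β : Type} (R : α → β → Prop) (f : α → ι → α) (g : β → ι → β) :
    ∀ (l : List ι) (a : α) (b : β), R a b →
    (∀ a b x, x ∈ l → R a b → R (f a x) (g b x)) → R (l.foldl f a) (l.foldl g b) := by
  intro l
  induction l with
  | nil => intro a b h _; exact h
  | cons x t ih =>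
    intro a b h hstep
    exact ih _ _ (hstep a b x (by simp) h) (fun a b y hy => hstep a b y (by simp [hy]))

lemma contains_ext (s t : PySem.Set (Int × Int)) (h : ∀ x, x ∈ s ↔ x ∈ t) (c : Int × Int) :
    PySem.Set.contains s c = PySem.Set.contains t c := by
  by_cases hc : c ∈ s
  · rw [(PySem.Set.contains_iff s c).mpr hc, (PySem.Set.contains_iff t c).mpr ((h c).mp hc)]
  · rw [contains_false s c hc, contains_false t c (fun ht => hc ((h c).mpr ht))]

-- ===== VERDICT (by name: the statement is the Claim_ definition above) =====
theorem split_garden_into_regions_spec : Claim_equal_split_garden_into_regions := by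
  intro garden _
  show split_garden_into_regions garden = split_garden_into_regions_alt garden
  rw [split_garden_into_regions, split_garden_into_regions_alt,
    PySem.List.enumerate_eq_map_pyRange garden "", List.foldl_map]
  have main := foldl_rel
    (fun (stA stB : List (List (Int × Int)) × PySem.Set (Int × Int)) =>
      stA.1 = stB.1 ∧ ∀ x, x ∈ stA.2 ↔ x ∈ stB.2)
    (fun st i =>
      (PySem.List.pyRange 0 (PySem.Str.len (PySem.List.pyGetD garden i "")) 1).foldl (fun st j =>
        if !(PySem.Set.contains st.2 (i, j)) then
          let region := get_region_for_plot i j garden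
          (st.1 ++ [(pvCells garden).filter (fun c => PySem.Set.contains region c)],
           PySem.Set.union st.2 region)
        else st) st)
    (fun st i =>
      (PySem.List.pyRange 0 (PySem.Str.len ((i, PySem.List.pyGetD garden i "")).2) 1).foldl
        (fun st j =>
        if PySem.Set.contains st.2 (((i, PySem.List.pyGetD garden i "")).1, j) then st
        else
          let region := pvExpand garden
            (PySem.Str.pyGet? ((i, PySem.List.pyGetD garden i "")).2 j)
            ((pvCells garden).length + 2) PySem.Set.empty
            (PySem.Set.ofList [(((i, PySem.List.pyGetD garden i "")).1, j)])
          (st.1 ++ [(pvCells garden).filter (fun c => PySem.Set.contains region c)],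
           PySem.Set.union st.2 region)) st)
    (PySem.List.pyRange 0 (PySem.List.len garden) 1)
    (([] : List (List (Int × Int))), (PySem.Set.empty : PySem.Set (Int × Int)))
    (([] : List (List (Int × Int))), (PySem.Set.empty : PySem.Set (Int × Int)))
    ⟨rfl, fun _ => Iff.rfl⟩ ?_
  · exact main.1
  · intro stA0 stB0 i hi hR0
    have hi' := PySem.List.mem_pyRange_one.mp hi
    refine foldl_rel
      (fun (stA stB : List (List (Int × Int)) × PySem.Set (Int × Int)) =>
        stA.1 = stB.1 ∧ ∀ x, x ∈ stA.2 ↔ x ∈ stB.2) _ _ _ stA0 stB0 hR0 ?_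
    intro stA stB j hj hR
    have hj' := PySem.List.mem_pyRange_one.mp hj
    have hins : is_plot_inside_garden i j garden = true := by
      rw [is_plot_inside_garden]
      simp only [Bool.and_eq_true, decide_eq_true_eq]
      exact ⟨⟨hi'.1, hi'.2⟩, hj'.1, hj'.2⟩
    have hcont := contains_ext stA.2 stB.2 hR.2 (i, j)
    by_cases hA : PySem.Set.contains stA.2 (i, j) = true
    · have hB : PySem.Set.contains stB.2 (i, j) = true := by rw [← hcont]; exact hA
      simp only [hA, hB, Bool.not_true, Bool.false_eq_true, if_false, if_true]
      exact hR
    · have hB : ¬ PySem.Set.contains stB.2 (i, j) = true := by rw [← hcont]; exact hA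
      simp only [Bool.not_eq_true] at hA hB
      simp only [hA, hB, Bool.not_false, Bool.false_eq_true, if_false, if_true]
      have hreg : ∀ x, x ∈ get_region_for_plot i j garden ↔
          x ∈ pvExpand garden (PySem.Str.pyGet? (PySem.List.pyGetD garden i "") j)
            ((pvCells garden).length + 2) PySem.Set.empty (PySem.Set.ofList [(i, j)]) := by
        intro x
        rw [pyGetD_val garden i j hi'.1 hi'.2]
        exact (get_region_mem garden i j hins x).trans
          (pvExpand_top_mem garden i j hins x).symm
      constructor
      · show stA.1 ++ _ = stB.1 ++ _
        rw [hR.1, List.filter_congr (fun c _ => contains_ext _ _ hreg c)]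
      · intro x
        show x ∈ PySem.Set.union stA.2 _ ↔ x ∈ PySem.Set.union stB.2 _
        rw [PySem.Set.mem_union, PySem.Set.mem_union]
        exact or_congr (hR.2 x) (hreg x)
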